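-- pv_equiv track=rewrite | github.com/emilydumas/mcs275spring2021 | samplecode/debugging/puzzle1/longest_word.py | lower_line_words
-- ===== SOURCE A (Python) =====
-- punctuation = ".,;:-'\""
--
-- def lower_line_words(s):
--     """Break a line of text into words, converted to lower case"""
--     # Replace punctuation with whitespace
--     for c in punctuation:
--         s = s.replace(c," ")
--     # Split into words, which may be capitalized
--     raw_words = s.split()
--     # Normalize capitalization
--     lower_words = []
--     for w in raw_words:
--         lower_words.append(w.lower())
--     return lower_words
-- ===== SOURCE B (Python) =====
-- punctuation = ".,;:-'\""
--
-- def lower_line_words(s):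
--     """Break a line of text into words, converted to lower case"""
--     words = []
--     buf = []
--     for c in s:
--         if c.isspace() or c in punctuation:
--             if buf:
--                 words.append("".join(buf).lower())
--                 buf = []
--         else:
--             buf.append(c)
--     if buf:
--         words.append("".join(buf).lower())
--     return words
-- ===== Notes on version B (the rewrite author's own statement) =====
-- stated objective: simpler
-- what changed: Replaces A's multi-pass pipeline (seven replace passes over the whole string, then split(), then a lowercasing loop over the words) by a single left-to-right scan that buffers word characters and emits each lowercased word when a separator (whitespace or punctuation) is reached.
import Mathlib
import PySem

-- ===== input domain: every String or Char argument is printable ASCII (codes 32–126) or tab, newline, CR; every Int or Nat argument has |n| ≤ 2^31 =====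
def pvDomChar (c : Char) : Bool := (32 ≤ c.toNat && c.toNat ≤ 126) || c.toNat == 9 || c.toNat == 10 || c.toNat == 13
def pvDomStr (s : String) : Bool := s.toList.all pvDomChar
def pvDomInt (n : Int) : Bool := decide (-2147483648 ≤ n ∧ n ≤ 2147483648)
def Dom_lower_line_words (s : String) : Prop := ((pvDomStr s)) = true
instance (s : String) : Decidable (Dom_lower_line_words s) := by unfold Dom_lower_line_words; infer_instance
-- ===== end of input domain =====

-- B replaces A's multi-pass pipeline (one replace pass per punctuation character, then split, then a
-- lowercasing loop) by a single left-to-right scan building the lowercased words directly (objective: simpler one-pass algorithm).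

-- ===== PORT A =====
-- module-level constant: punctuation = ".,;:-'\"" — iterated as single-character strings
def pvPunctStrs : List String := [".", ",", ";", ":", "-", "'", "\""]

def lower_line_words (s : String) : List String :=
  -- for c in punctuation: s = s.replace(c, " ")
  let s1 := pvPunctStrs.foldl (fun t c => PySem.Str.replace t c " ") s
  -- raw_words = s.split()
  let raw := PySem.Str.split₀ s1
  -- for w in raw_words: lower_words.append(w.lower())
  raw.foldl (fun acc w => acc ++ [PySem.Str.lower w]) []

-- ===== PORT B =====
def pvPunct : List Char := ['.', ',', ';', ':', '-', '\'', '"']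

def pvAltGo : List Char → List Char → List String → List String
  | [], buf, acc => if buf = [] then acc else acc ++ [String.ofList (PySem.Chars.lower buf)]
  | c :: rest, buf, acc =>
    if PySem.Chars.isspace c || pvPunct.contains c then
      if buf = [] then pvAltGo rest [] acc
      else pvAltGo rest [] (acc ++ [String.ofList (PySem.Chars.lower buf)])
    else pvAltGo rest (buf ++ [c]) acc

def lower_line_words_alt (s : String) : List String := pvAltGo s.toList [] []

-- ===== PRECONDITION & SPEC =====
def Spec_lower_line_words (s : String) (out : List String) : Prop := out = lower_line_words_alt s
instance (s : String) (out : List String) : Decidable (Spec_lower_line_words s out) := by unfold Spec_lower_line_words; infer_instance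

-- ===== CLAIM (what is proved, stated in full; the proofs are below) =====
def Claim_equal_lower_line_words : Prop := ∀ (s : String), Dom_lower_line_words s → Spec_lower_line_words s (lower_line_words s)

-- ===== LEMMAS AND PROOFS =====

/-- replacing one character by `' '`, seen pointwise -/
def pvRep (c d : Char) : Char := if d == c then ' ' else d

/-- the combined effect of all seven punctuation replacements -/
def pvRepAll (d : Char) : Char := if pvPunct.contains d then ' ' else d

theorem pv_replace_go_single (c : Char) :
    ∀ (l : List Char) (fuel : Nat) (acc : List Char), l.length ≤ fuel →
      PySem.Chars.replace.go [c] [' '] fuel l acc = acc.reverse ++ l.map (pvRep c) := by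
  intro l
  induction l with
  | nil =>
    intro fuel acc _
    cases fuel <;> simp [PySem.Chars.replace.go]
  | cons d t ih =>
    intro fuel acc h
    cases fuel with
    | zero => simp at h
    | succ n =>
      simp only [PySem.Chars.replace.go]
      by_cases hd : d = c
      · subst hd
        have hp : [d].isPrefixOf (d :: t) = true := by simp [List.isPrefixOf]
        rw [if_pos hp]
        rw [show List.drop [d].length (d :: t) = t from rfl,
            show ([' '].reverse ++ acc) = ' ' :: acc from rfl]
        rw [ih n (' ' :: acc) (Nat.le_of_succ_le_succ h)]
        simp [pvRep]
      · have hp : [c].isPrefixOf (d :: t) = false := by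
          simp only [List.isPrefixOf, Bool.and_true, beq_eq_false_iff_ne]
          exact fun h' => hd h'.symm
        rw [if_neg (by simp [hp])]
        rw [ih n (d :: acc) (Nat.le_of_succ_le_succ h)]
        simp [pvRep, hd]

theorem pv_replace_single (c : Char) (t : List Char) :
    PySem.Chars.replace t [c] [' '] = t.map (pvRep c) := by
  simp only [PySem.Chars.replace, List.isEmpty_cons]
  rw [if_neg (by simp)]
  simpa using pv_replace_go_single c t t.length [] (le_refl _)

theorem pv_chain_eq (d : Char) :
    pvRep '"' (pvRep '\'' (pvRep '-' (pvRep ':' (pvRep ';' (pvRep ',' (pvRep '.' d)))))) = pvRepAll d := by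
  simp only [pvRep, pvRepAll, pvPunct, List.contains]
  split_ifs <;> simp_all

theorem pv_repAll_of_mem (c : Char) (h : pvPunct.contains c = true) : pvRepAll c = ' ' := by
  simp only [pvRepAll]
  rw [if_pos h]

theorem pv_repAll_of_not_mem (c : Char) (h : pvPunct.contains c = false) : pvRepAll c = c := by
  simp only [pvRepAll]
  rw [if_neg (fun hh => by rw [h] at hh; exact Bool.noConfusion hh)]

theorem pv_sep_eq (c : Char) :
    PySem.Chars.isspace (pvRepAll c) = (PySem.Chars.isspace c || pvPunct.contains c) := by
  cases h : pvPunct.contains c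
  · rw [pv_repAll_of_not_mem c h]
    simp
  · rw [pv_repAll_of_mem c h]
    have : PySem.Chars.isspace ' ' = true := by decide
    simp [this]

theorem pv_split_go_nil (cur : List Char) (acc : List (List Char)) :
    PySem.Chars.split₀.go [] cur acc
      = if cur = [] then acc.reverse else acc.reverse ++ [cur.reverse] := by
  simp [PySem.Chars.split₀.go, List.isEmpty_iff]

theorem pv_split_go_cons (c : Char) (cs cur : List Char) (acc : List (List Char)) :
    PySem.Chars.split₀.go (c :: cs) cur acc
      = if PySem.Chars.isspace c then
          (if cur = [] then PySem.Chars.split₀.go cs [] acc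
           else PySem.Chars.split₀.go cs [] (cur.reverse :: acc))
        else PySem.Chars.split₀.go cs (c :: cur) acc := by
  simp [PySem.Chars.split₀.go, List.isEmpty_iff]

theorem pv_go_eq :
    ∀ (l cur : List Char) (acc : List (List Char)),
      (PySem.Chars.split₀.go (l.map pvRepAll) cur acc).map (fun w => String.ofList (PySem.Chars.lower w))
        = pvAltGo l cur.reverse (acc.reverse.map (fun w => String.ofList (PySem.Chars.lower w))) := by
  intro l
  induction l with
  | nil =>
    intro cur acc
    rw [List.map_nil, pv_split_go_nil]
    by_cases hc : cur = []
    · subst hc; simp [pvAltGo]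
    · rw [if_neg hc]
      have hc' : cur.reverse ≠ [] := by simpa using hc
      simp [pvAltGo, hc']
  | cons c rest ih =>
    intro cur acc
    rw [List.map_cons, pv_split_go_cons, pv_sep_eq]
    show _ = pvAltGo (c :: rest) cur.reverse _
    unfold pvAltGo
    by_cases hs : (PySem.Chars.isspace c || pvPunct.contains c) = true
    · rw [if_pos hs, if_pos hs]
      by_cases hc : cur = []
      · subst hc
        rw [if_pos rfl, show ([] : List Char).reverse = [] from rfl, if_pos rfl]
        simpa using ih [] acc
      · have hc' : cur.reverse ≠ [] := by simpa using hc
        rw [if_neg hc, if_neg hc']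
        rw [ih [] (cur.reverse :: acc)]
        simp
    · have hs' : (PySem.Chars.isspace c || pvPunct.contains c) = false := by
        simpa using hs
      have hcp : pvPunct.contains c = false := by
        cases h : pvPunct.contains c
        · rfl
        · rw [h] at hs'; simp at hs'
      rw [if_neg hs, if_neg hs]
      rw [pv_repAll_of_not_mem c hcp, ih (c :: cur) acc]
      simp

theorem pv_foldl_lower (l : List String) (a : List String) :
    l.foldl (fun acc w => acc ++ [PySem.Str.lower w]) a = a ++ l.map PySem.Str.lower := by
  induction l generalizing a with
  | nil => simp
  | cons w t ih => simp [List.foldl, ih]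

theorem pv_chain_maps (l : List Char) :
    ((((((((l.map (pvRep '.')).map (pvRep ',')).map (pvRep ';')).map (pvRep ':')).map (pvRep '-')).map (pvRep '\''))).map (pvRep '"')) = l.map pvRepAll := by
  induction l with
  | nil => rfl
  | cons d t ih => simp only [List.map_cons, ih, pv_chain_eq]

theorem pv_s1_toList (s : String) :
    (pvPunctStrs.foldl (fun t c => PySem.Str.replace t c " ") s).toList = s.toList.map pvRepAll := by
  simp only [pvPunctStrs, List.foldl_cons, List.foldl_nil]
  rw [PySem.Str.toList_replace, PySem.Str.toList_replace, PySem.Str.toList_replace,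
      PySem.Str.toList_replace, PySem.Str.toList_replace, PySem.Str.toList_replace,
      PySem.Str.toList_replace]
  rw [show (".").toList = ['.'] from by decide, show (",").toList = [','] from by decide,
      show (";").toList = [';'] from by decide, show (":").toList = [':'] from by decide,
      show ("-").toList = ['-'] from by decide, show ("'").toList = ['\''] from by decide,
      show ("\"").toList = ['"'] from by decide, show (" ").toList = [' '] from by decide]
  rw [pv_replace_single, pv_replace_single, pv_replace_single, pv_replace_single,
      pv_replace_single, pv_replace_single, pv_replace_single]
  exact pv_chain_maps s.toList

theorem pv_str_lower_eq (w : String) :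
    PySem.Str.lower w = String.ofList (PySem.Chars.lower w.toList) := by
  rw [← PySem.Str.toList_lower, String.ofList_toList]

-- ===== VERDICT (by name: the statement is the Claim_ definition above) =====
theorem lower_line_words_spec : Claim_equal_lower_line_words := by
  intro s _
  unfold Spec_lower_line_words lower_line_words lower_line_words_alt
  rw [pv_foldl_lower]
  simp only [List.nil_append]
  have hsplit : PySem.Str.split₀ (pvPunctStrs.foldl (fun t c => PySem.Str.replace t c " ") s)
      = (PySem.Chars.split₀ (s.toList.map pvRepAll)).map String.ofList := by
    have h := PySem.Str.split₀_map_toList (pvPunctStrs.foldl (fun t c => PySem.Str.replace t c " ") s)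
    rw [pv_s1_toList] at h
    rw [← h, List.map_map]
    simp only [Function.comp_def, String.ofList_toList, List.map_id']
  rw [hsplit, List.map_map]
  have hfun : (PySem.Str.lower ∘ String.ofList)
      = fun (w : List Char) => String.ofList (PySem.Chars.lower w) := by
    funext w
    simp [Function.comp, pv_str_lower_eq (String.ofList w), String.toList_ofList]
  rw [hfun]
  simpa using pv_go_eq s.toList [] []
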